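-- pv_equiv track=rewrite | github.com/BrageHK/Master2026-XAI-pipeline | analyze_xai.py | zone_distribution
-- ===== SOURCE A (Python) =====
-- from typing import Dict, List, Optional
--
-- def zone_distribution(records: List[dict]) -> Dict[str, Dict[str, int]]:
--     """Count total and TP per zone_category."""
--     cats = ["pz_only", "tz_only", "both_pz", "both_tz", "unknown"]
--     dist: Dict[str, Dict[str, int]] = {c: {"total": 0, "tp": 0} for c in cats}
--     for r in records:
--         cat = r.get("zone_category") or "unknown"
--         if cat not in dist:
--             cat = "unknown"
--         dist[cat]["total"] += 1
--         if r.get("classification") == "tp":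
--             dist[cat]["tp"] += 1
--     return dist
-- ===== SOURCE B (Python) =====
-- from typing import Dict, List
--
-- CATS = ["pz_only", "tz_only", "both_pz", "both_tz", "unknown"]
--
-- def _bucket(r: dict) -> str:
--     cat = r.get("zone_category") or "unknown"
--     return cat if cat in CATS else "unknown"
--
-- def zone_distribution(records: List[dict]) -> Dict[str, Dict[str, int]]:
--     """Count total and TP per zone_category."""
--     return {c: {"total": sum(1 for r in records if _bucket(r) == c),
--                 "tp": sum(1 for r in records
--                           if _bucket(r) == c and r.get("classification") == "tp")}
--             for c in CATS}
-- ===== Notes on version B (the rewrite author's own statement) =====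
-- stated objective: alternative
-- what changed: Replaces A's single pass that mutates a nested counter dict with a normalization helper and a dict comprehension that computes each category's total/tp by per-category filtered sums.
import Mathlib
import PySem

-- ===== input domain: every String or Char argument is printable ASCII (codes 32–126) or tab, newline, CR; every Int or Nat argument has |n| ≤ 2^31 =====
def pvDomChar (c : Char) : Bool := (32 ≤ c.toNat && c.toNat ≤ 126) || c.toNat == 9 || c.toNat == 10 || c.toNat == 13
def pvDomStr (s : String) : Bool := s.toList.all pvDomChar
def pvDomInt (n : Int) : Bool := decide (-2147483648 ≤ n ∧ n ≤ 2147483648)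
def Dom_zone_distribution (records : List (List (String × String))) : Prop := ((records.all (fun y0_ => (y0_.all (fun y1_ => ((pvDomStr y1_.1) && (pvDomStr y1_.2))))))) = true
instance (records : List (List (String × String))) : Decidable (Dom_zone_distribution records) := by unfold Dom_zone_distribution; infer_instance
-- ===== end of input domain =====

-- B replaces A's single mutating pass over a nested counter dict with per-category
-- filtered sums built by a dict comprehension (alternative decomposition, same results).

-- the five fixed zone categories (the `cats` list both Pythons carry)
def pvCats : List String := ["pz_only", "tz_only", "both_pz", "both_tz", "unknown"]

-- `r.get("zone_category") or "unknown"` (falsy = missing key or empty string), shared by both Pythons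
def pvCat0 (r : List (String × String)) : String :=
  match (PySem.Dict.mk r).get? "zone_category" with
  | some s => if s = "" then "unknown" else s
  | none => "unknown"

-- ===== PORT A =====
-- one loop iteration of A: fall back to "unknown" if cat is not a key of dist,
-- then bump dist[cat]["total"] and, on classification == "tp", dist[cat]["tp"]
def pvAStep (dist : PySem.Dict String (PySem.Dict String Int)) (r : List (String × String)) :
    PySem.Dict String (PySem.Dict String Int) :=
  let cat0 := pvCat0 r
  let cat := if dist.contains cat0 then cat0 else "unknown"
  let dist' := dist.modify cat PySem.Dict.empty (fun inner => inner.modify "total" 0 (· + 1))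
  if (PySem.Dict.mk r).get? "classification" == some "tp" then
    dist'.modify cat PySem.Dict.empty (fun inner => inner.modify "tp" 0 (· + 1))
  else dist'

def zone_distribution (records : List (List (String × String))) : List (String × List (String × Int)) :=
  ((records.foldl pvAStep
      (PySem.Dict.ofList (pvCats.map (fun c => (c, PySem.Dict.ofList [("total", (0 : Int)), ("tp", (0 : Int))]))))).items.map
    (fun p => (p.1, p.2.items)))

-- ===== PORT B =====
-- normalize a record to its bucket
def pvBucket (r : List (String × String)) : String :=
  let cat := pvCat0 r
  if cat ∈ pvCats then cat else "unknown"

def zone_distribution_alt (records : List (List (String × String))) : List (String × List (String × Int)) :=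
  pvCats.map (fun c =>
    (c, [("total", (records.map (fun r => if pvBucket r = c then (1 : Int) else 0)).sum),
         ("tp", (records.map (fun r =>
            if pvBucket r = c ∧ (PySem.Dict.mk r).get? "classification" == some "tp" then (1 : Int) else 0)).sum)]))

-- ===== PRECONDITION & SPEC =====
def Spec_zone_distribution (records : List (List (String × String))) (out : List (String × List (String × Int))) : Prop := out = zone_distribution_alt records
instance (records : List (List (String × String))) (out : List (String × List (String × Int))) : Decidable (Spec_zone_distribution records out) := by unfold Spec_zone_distribution; infer_instance

-- ===== CLAIM (what is proved, stated in full; the proofs are below) =====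
def Claim_equal_zone_distribution : Prop := ∀ (records : List (List (String × String))), Dom_zone_distribution records → Spec_zone_distribution records (zone_distribution records)

-- ===== LEMMAS AND PROOFS =====

-- A's dist after any prefix of the loop: the five fixed keys with symbolic counters
def pvMkD (f g : String → Int) : PySem.Dict String (PySem.Dict String Int) :=
  PySem.Dict.mk (pvCats.map (fun c => (c, PySem.Dict.mk [("total", f c), ("tp", g c)])))

theorem pvBucket_eq (r : List (String × String)) :
    pvBucket r = if pvCat0 r ∈ pvCats then pvCat0 r else "unknown" := rfl

theorem pvBucket_mem (r : List (String × String)) : pvBucket r ∈ pvCats := by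
  rw [pvBucket_eq]
  split_ifs with h
  · exact h
  · simp [pvCats]

theorem pvContains_mkD (f g : String → Int) (s : String) :
    (pvMkD f g).contains s = true ↔ s ∈ pvCats := by
  rw [PySem.Dict.contains_iff_mem_keys]
  simp [pvMkD, pvCats]

theorem pvCat_sel (f g : String → Int) (r : List (String × String)) :
    (if (pvMkD f g).contains (pvCat0 r) then pvCat0 r else "unknown") = pvBucket r := by
  rw [pvBucket_eq]
  by_cases h : pvCat0 r ∈ pvCats
  · rw [if_pos ((pvContains_mkD f g _).mpr h), if_pos h]
  · rw [if_neg (fun hb => h ((pvContains_mkD f g _).mp hb)), if_neg h]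

theorem pvStep_mkD (f g : String → Int) (r : List (String × String)) :
    pvAStep (pvMkD f g) r =
      pvMkD (fun c => if pvBucket r = c then f c + 1 else f c)
            (fun c => if pvBucket r = c ∧ (PySem.Dict.mk r).get? "classification" == some "tp" then g c + 1 else g c) := by
  have hmem := pvBucket_mem r
  simp only [pvAStep]
  rw [pvCat_sel]
  simp only [pvCats, List.mem_cons, List.not_mem_nil, or_false] at hmem
  by_cases htp : ((PySem.Dict.mk r).get? "classification" == some "tp") = true
  · rcases hmem with h | h | h | h | h <;> simp only [h, htp] <;> rfl
  · rw [Bool.not_eq_true] at htp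
    rcases hmem with h | h | h | h | h <;> simp only [h, htp] <;> rfl

theorem pvFoldl_mkD (l : List (List (String × String))) (f g : String → Int) :
    l.foldl pvAStep (pvMkD f g) =
      pvMkD (fun c => f c + (l.map (fun r => if pvBucket r = c then (1 : Int) else 0)).sum)
            (fun c => g c + (l.map (fun r =>
               if pvBucket r = c ∧ (PySem.Dict.mk r).get? "classification" == some "tp" then (1 : Int) else 0)).sum) := by
  induction l generalizing f g with
  | nil => simp [pvMkD, pvCats]
  | cons r l ih =>
    rw [List.foldl_cons, pvStep_mkD, ih]
    have hmem := pvBucket_mem r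
    simp only [pvCats, List.mem_cons, List.not_mem_nil, or_false] at hmem
    by_cases htp : ((PySem.Dict.mk r).get? "classification" == some "tp") = true
    · rw [beq_iff_eq] at htp
      rcases hmem with h | h | h | h | h <;>
        simp [pvMkD, pvCats, h, htp] <;> first | (constructor <;> ring) | ring
    · rw [Bool.not_eq_true, beq_eq_false_iff_ne] at htp
      rcases hmem with h | h | h | h | h <;>
        simp [pvMkD, pvCats, h, htp] <;> first | (constructor <;> ring) | ring

-- ===== VERDICT (by name: the statement is the Claim_ definition above) =====
theorem zone_distribution_spec : Claim_equal_zone_distribution := by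
  intro records _
  unfold Spec_zone_distribution zone_distribution
  have hinit : PySem.Dict.ofList (pvCats.map (fun c => (c, PySem.Dict.ofList [("total", (0 : Int)), ("tp", (0 : Int))]))) = pvMkD (fun _ => 0) (fun _ => 0) := by decide
  rw [hinit, pvFoldl_mkD]
  simp [pvMkD, pvCats, zone_distribution_alt]
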